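-- pv_equiv track=rewrite | github.com/TRASALBY/Problem-Solving | Programers/기능개발.py | solution
-- ===== SOURCE A (Python) =====
-- def solution(progresses, speeds):
--     answer = []
--     while progresses != []:
--         return_cnt = 0
--         for i in range(len(progresses)):
--             progresses[i] += speeds[i]
--
--         if progresses[0] >= 100:
--             while progresses != []:
--                 if progresses[0] >= 100:
--                     return_cnt +=1
--                     progresses.remove(progresses[0])
--                     speeds.remove(speeds[0])
--                 else:
--                     break
--             answer.append(return_cnt)
--     return answer
-- ===== SOURCE B (Python) =====
-- def solution(progresses, speeds):
--     answer = []
--     cur = 0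
--     for p, s in zip(progresses, speeds):
--         d = max(1, -((p - 100) // s))
--         if d > cur:
--             cur = d
--             answer.append(1)
--         else:
--             answer[-1] += 1
--     return answer
-- ===== Notes on version B (the rewrite author's own statement) =====
-- stated objective: faster
-- what changed: Replaces the day-by-day simulation (re-adding speeds to every unfinished feature each day and popping the front) by a closed-form ceil-division finish day per feature and a single pass that groups by the running maximum finish day; intended as faster (O(n) vs O(n*D)) — a timing run saw A time out where B returned but could not measure a clean ratio.
-- outside the precondition, e.g. on solution([100], [0]): A returns [1], B raises ZeroDivisionError
import Mathlib
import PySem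

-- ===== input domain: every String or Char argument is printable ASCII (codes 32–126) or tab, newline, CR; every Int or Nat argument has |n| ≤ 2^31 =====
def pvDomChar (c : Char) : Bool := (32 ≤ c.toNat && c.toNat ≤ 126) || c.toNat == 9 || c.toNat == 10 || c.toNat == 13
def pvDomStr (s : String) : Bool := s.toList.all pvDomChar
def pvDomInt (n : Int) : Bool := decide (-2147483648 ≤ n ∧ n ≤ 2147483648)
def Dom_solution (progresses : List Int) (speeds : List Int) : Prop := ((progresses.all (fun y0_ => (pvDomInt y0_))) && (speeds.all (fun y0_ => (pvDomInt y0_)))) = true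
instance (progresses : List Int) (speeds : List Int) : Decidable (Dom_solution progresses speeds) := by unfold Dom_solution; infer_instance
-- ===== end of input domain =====

-- B replaces A's day-by-day simulation by a closed-form finish day per feature and one
-- grouping pass; intended as faster (a timing run saw A time out at n=16 where B
-- returned, but could not measure a clean ratio). A mutates its argument lists in place
-- (it empties them); B does not — the equivalence proved is about the RETURN value only.

-- ===== PORT A =====
-- `for i in range(len(progresses)): progresses[i] += speeds[i]` — element-wise add;
-- exact when speeds is at least as long as progresses (Pre_; otherwise Python raises IndexError).
def dayAdd : List Int → List Int → List Int
  | [], _ => []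
  | _ :: _, [] => []
  | p :: ps, s :: ss => (p + s) :: dayAdd ps ss

-- the inner `while`: pop the front while progresses[0] >= 100, counting pops
def popFinished : List Int → List Int → Int × List Int × List Int
  | [], ss => (0, [], ss)
  | p :: ps, ss =>
    if p ≥ 100 then
      let r := popFinished ps ss.tail
      (r.1 + 1, r.2.1, r.2.2)
    else (0, p :: ps, ss)

-- the outer `while progresses != []`, one fuel unit per day (fuel only makes the
-- recursion total; under Pre_ the supplied fuel is proved sufficient)
def loopA : Nat → List Int → List Int → List Int → List Int
  | 0, _, _, ans => ans
  | fuel + 1, ps, ss, ans =>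
    match ps with
    | [] => ans
    | _ :: _ =>
      let ps1 := dayAdd ps ss
      if ps1.headD 0 ≥ 100 then
        let r := popFinished ps1 ss
        loopA fuel r.2.1 r.2.2 (ans ++ [r.1])
      else loopA fuel ps1 ss ans

def solution (progresses : List Int) (speeds : List Int) : List Int :=
  loopA (progresses.length + (progresses.map (fun p => (100 - p).toNat)).sum) progresses speeds []

-- ===== PORT B =====
-- d = max(1, -((p - 100) // s)) : first day (≥ 1) on which p + d*s ≥ 100
def daysB (p s : Int) : Int := max 1 (-(PySem.Int.floordiv (p - 100) s))

-- `answer[-1] += 1`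
def bumpLast : List Int → List Int
  | [] => []
  | [x] => [x + 1]
  | x :: xs => x :: bumpLast xs

def goB : List (Int × Int) → Int → List Int → List Int
  | [], _, ans => ans
  | (p, s) :: rest, cur, ans =>
    let d := daysB p s
    if d > cur then goB rest d (ans ++ [1]) else goB rest cur (bumpLast ans)

def solution_alt (progresses : List Int) (speeds : List Int) : List Int :=
  goB (progresses.zip speeds) 0 []

-- ===== PRECONDITION & SPEC =====
-- Pre_ excludes inputs where speeds is shorter than progresses (A raises IndexError) and
-- inputs with a non-positive paired speed, on which A loops forever except in the lucky
-- corner where every feature already finishes on day one (there A returns but B's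
-- ceil division is undefined/meaningless).
def Pre_solution (progresses : List Int) (speeds : List Int) : Prop :=
  progresses.length ≤ speeds.length ∧ ∀ x ∈ progresses.zip speeds, 1 ≤ x.2
instance (progresses : List Int) (speeds : List Int) : Decidable (Pre_solution progresses speeds) := by unfold Pre_solution; infer_instance

def pvWitness_solution : List Int × List Int := ([93, 30, 55], [1, 30, 5])

def Spec_solution (progresses : List Int) (speeds : List Int) (out : List Int) : Prop := out = solution_alt progresses speeds
instance (progresses : List Int) (speeds : List Int) (out : List Int) : Decidable (Spec_solution progresses speeds out) := by unfold Spec_solution; infer_instance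

-- ===== CLAIM (what is proved, stated in full; the proofs are below) =====
def Claim_equal_solution : Prop := ∀ (progresses : List Int) (speeds : List Int), Dom_solution progresses speeds → Pre_solution progresses speeds → Spec_solution progresses speeds (solution progresses speeds)

-- ===== LEMMAS AND PROOFS =====

-- grouping over the plain list of finish days (goB with the day computation factored out)
def g : List Int → Int → List Int → List Int
  | [], _, ans => ans
  | d :: rest, cur, ans => if d > cur then g rest d (ans ++ [1]) else g rest cur (bumpLast ans)

lemma goB_eq_g (l : List (Int × Int)) (cur : Int) (ans : List Int) :
    goB l cur ans = g (l.map (fun x => daysB x.1 x.2)) cur ans := by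
  induction l generalizing cur ans with
  | nil => rfl
  | cons x rest ih => cases x; simp only [goB, g, List.map_cons]; split <;> exact ih _ _

-- arithmetic facts about daysB (s ≥ 1)
lemma daysB_ge_one (p s : Int) : 1 ≤ daysB p s := le_max_left _ _

lemma daysB_one_iff (p s : Int) (hs : 1 ≤ s) : daysB p s = 1 ↔ 100 ≤ p + s := by
  unfold daysB
  rw [PySem.Int.floordiv_eq_ediv_of_pos (by omega)]
  rw [max_eq_left_iff]
  constructor
  · intro h
    have h' : (-1 : Int) ≤ (p - 100) / s := by omega
    have := (Int.le_ediv_iff_mul_le (by omega : (0:Int) < s)).mp h'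
    omega
  · intro h
    have : (-1 : Int) * s ≤ p - 100 := by omega
    have := (Int.le_ediv_iff_mul_le (by omega : (0:Int) < s)).mpr this
    omega

lemma daysB_ge_two (p s : Int) (hs : 1 ≤ s) (h : p + s < 100) : 2 ≤ daysB p s := by
  have h1 := daysB_ge_one p s
  have h2 := (daysB_one_iff p s hs).mpr
  by_contra hc
  exact absurd ((daysB_one_iff p s hs).mp (by omega)) (by omega)

lemma daysB_shift (p s : Int) (hs : 1 ≤ s) :
    daysB (p + s) s = max 1 (daysB p s - 1) := by
  unfold daysB
  have h : p + s - 100 = (p - 100) + 1 * s := by ring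
  rw [h, PySem.Int.floordiv_eq_ediv_of_pos (by omega : (0:Int) < s),
    PySem.Int.floordiv_eq_ediv_of_pos (by omega : (0:Int) < s),
    Int.add_mul_ediv_right _ _ (by omega : s ≠ 0)]
  omega

-- dayAdd as a map over the zip
lemma dayAdd_eq_map : ∀ (ps ss : List Int), ps.length ≤ ss.length →
    dayAdd ps ss = (ps.zip ss).map (fun x => x.1 + x.2)
  | [], _, _ => rfl
  | _ :: _, [], h => by simp at h
  | p :: ps, s :: ss, h => by
    simp only [dayAdd, List.zip_cons_cons, List.map_cons, List.cons.injEq, true_and]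
    exact dayAdd_eq_map ps ss (by simpa using h)

-- the state after a day, zipped with the speeds, is the shifted zip
lemma zip_shift : ∀ (ps ss : List Int), ps.length ≤ ss.length →
    (dayAdd ps ss).zip ss = (ps.zip ss).map (fun x => (x.1 + x.2, x.2))
  | [], _, _ => by simp [dayAdd]
  | _ :: _, [], h => by simp at h
  | p :: ps, s :: ss, h => by
    simp only [dayAdd, List.zip_cons_cons, List.map_cons, List.cons.injEq, true_and]
    exact zip_shift ps ss (by simpa using h)

lemma zip_drop (a b : List Int) (n : Nat) : (a.drop n).zip (b.drop n) = (a.zip b).drop n := by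
  simp [List.zip, List.drop_zipWith]

-- popFinished pops exactly the leading run of elements ≥ 100 (and as many speeds)
lemma popFinished_eq : ∀ (ps ss : List Int),
    popFinished ps ss =
      (((ps.takeWhile (fun p => 100 ≤ p)).length : Int),
        ps.drop (ps.takeWhile (fun p => 100 ≤ p)).length,
        ss.drop (ps.takeWhile (fun p => 100 ≤ p)).length)
  | [], ss => by simp [popFinished]
  | p :: ps, ss => by
    by_cases h : (100 : Int) ≤ p
    · have hrec := popFinished_eq ps ss.tail
      simp only [popFinished, ge_iff_le, if_pos h, hrec, List.takeWhile_cons, decide_eq_true_eq,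
        List.length_cons, List.drop_succ_cons, List.drop_tail, Prod.mk.injEq]
      simp
    · simp [popFinished, h]

-- the element just past the popped run (if any) is < 100
lemma drop_takeWhile_head (p : Int → Bool) :
    ∀ (l : List Int) (y : Int) (ys : List Int),
      l.drop (l.takeWhile p).length = y :: ys → p y = false
  | [], y, ys, h => by simp at h
  | x :: l, y, ys, h => by
    by_cases hx : p x
    · simp only [List.takeWhile_cons, hx, if_true, List.length_cons, List.drop_succ_cons] at h
      exact drop_takeWhile_head p l y ys h
    · simp only [List.takeWhile_cons, hx] at h
      cases h; simpa using hx

-- elements of the popped run are ≥ 100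
lemma takeWhile_prefix_take (p : Int → Bool) :
    ∀ (l : List Int), l.take (l.takeWhile p).length = l.takeWhile p
  | [] => rfl
  | x :: l => by
    by_cases hx : p x
    · simp [hx, takeWhile_prefix_take p l]
    · simp [hx]

-- shifting a state by one day shifts every finish day down one, floored at 1
lemma days_shift_list : ∀ (l : List (Int × Int)), (∀ x ∈ l, 1 ≤ x.2) →
    (l.map (fun x => (x.1 + x.2, x.2))).map (fun x => daysB x.1 x.2)
      = (l.map (fun x => daysB x.1 x.2)).map (fun d => max 1 (d - 1))
  | [], _ => rfl
  | x :: l, h => by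
    simp only [List.map_cons, List.cons.injEq]
    exact ⟨daysB_shift x.1 x.2 (h x (by simp)),
      days_shift_list l (fun y hy => h y (by simp [hy]))⟩

-- bumpLast / g bookkeeping
lemma bumpLast_append (a b : List Int) (hb : b ≠ []) :
    bumpLast (a ++ b) = a ++ bumpLast b := by
  induction a with
  | nil => rfl
  | cons x xs ih =>
    cases hxs : xs ++ b with
    | nil => exact absurd (List.append_eq_nil_iff.mp hxs).2 hb
    | cons y ys =>
      simp only [List.cons_append, bumpLast, hxs]
      rw [← hxs, ih]

lemma bumpLast_ne_nil (b : List Int) (hb : b ≠ []) : bumpLast b ≠ [] := by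
  cases b with
  | nil => exact absurd rfl hb
  | cons x xs => cases xs <;> simp [bumpLast]

lemma g_append (ds : List Int) (cur : Int) (a b : List Int) (hb : b ≠ []) :
    g ds cur (a ++ b) = a ++ g ds cur b := by
  induction ds generalizing cur b with
  | nil => rfl
  | cons d rest ih =>
    simp only [g]
    split
    · rw [List.append_assoc, ih _ _ (by simp)]
    · rw [bumpLast_append a b hb, ih _ _ (bumpLast_ne_nil b hb)]

lemma g_zero_factor (ds : List Int) (ans : List Int) (h : ∀ d ∈ ds, 1 ≤ d) :
    g ds 0 ans = ans ++ g ds 0 [] := by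
  cases ds with
  | nil => simp [g]
  | cons d rest =>
    have hd : d > 0 := h d (by simp)
    simp only [g, if_pos hd]
    rw [g_append rest d ans [1] (by simp)]
    rfl

-- shifting every finish day down one (floored at 1) does not change the grouping,
-- provided the running maximum is already ≥ 2
lemma g_high (ds : List Int) : ∀ (cur : Int) (ans : List Int), 2 ≤ cur →
    g (ds.map (fun d => max 1 (d - 1))) (cur - 1) ans = g ds cur ans := by
  induction ds with
  | nil => intro cur ans _; rfl
  | cons d rest ih =>
    intro cur ans hcur
    simp only [List.map_cons, g]
    by_cases h : d > cur
    · have hmax : max 1 (d - 1) = d - 1 := by omega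
      rw [hmax, if_pos (by omega : d - 1 > cur - 1), if_pos h]
      exact ih d _ (by omega)
    · have hle : ¬ (max 1 (d - 1) > cur - 1) := by
        rcases max_cases 1 (d - 1) with ⟨he, _⟩ | ⟨he, _⟩ <;> omega
      rw [if_neg hle, if_neg h]
      exact ih cur _ hcur

lemma g_low (d : Int) (rest : List Int) (cur cur' : Int) (ans : List Int)
    (hd : 2 ≤ d) (hc : cur < d) (hc' : cur' < d - 1) :
    g ((d :: rest).map (fun x => max 1 (x - 1))) cur' ans = g (d :: rest) cur ans := by
  simp only [List.map_cons, g]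
  rw [max_eq_right (by omega : (1:Int) ≤ d - 1),
    if_pos (by omega : d - 1 > cur'), if_pos (by omega : d > cur)]
  exact g_high rest d (ans ++ [1]) hd

-- a run of k day-one releases at cur = 1 just bumps the last counter k times
lemma g_ones (k : Nat) : ∀ (rest : List Int) (a : List Int) (j : Int),
    g (List.replicate k 1 ++ rest) 1 (a ++ [j]) = g rest 1 (a ++ [j + k]) := by
  induction k with
  | zero => intro rest a j; simp
  | succ k ih =>
    intro rest a j
    simp only [List.replicate_succ, List.cons_append, g]
    rw [if_neg (by omega : ¬ ((1:Int) > 1)), bumpLast_append a [j] (by simp)]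
    have hb : bumpLast [j] = [j + 1] := rfl
    rw [hb, ih rest a (j + 1)]
    have hcast : j + 1 + (k : Int) = j + ((k : Nat) + 1 : Nat) := by push_cast; ring
    rw [hcast]

lemma g_release (k : Nat) (rest : List Int) (ans : List Int) (hk : 1 ≤ k) :
    g (List.replicate k 1 ++ rest) 0 ans = g rest 1 (ans ++ [(k : Int)]) := by
  obtain ⟨k', rfl⟩ : ∃ k', k = k' + 1 := ⟨k - 1, by omega⟩
  simp only [List.replicate_succ, List.cons_append, g, if_pos (by omega : (1:Int) > 0)]
  rw [g_ones k' rest ans 1]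
  have hcast : (1 : Int) + (k' : Int) = ((k' + 1 : Nat) : Int) := by push_cast; ring
  rw [hcast]

-- the measure: strictly decreases with every outer-loop day
def measureA (ps : List Int) : Nat :=
  ps.length + (ps.map (fun p => (100 - p).toNat)).sum

lemma sum_map_le : ∀ (l : List (Int × Int)), (∀ x ∈ l, 1 ≤ x.2) →
    ((l.map (fun x => x.1 + x.2)).map (fun p => (100 - p).toNat)).sum ≤
      ((l.map Prod.fst).map (fun p => (100 - p).toNat)).sum
  | [], _ => le_refl _
  | x :: l, h => by
    simp only [List.map_cons, List.sum_cons]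
    have h1 : (100 - (x.1 + x.2)).toNat ≤ (100 - x.1).toNat := by
      have := h x (by simp); omega
    have h2 := sum_map_le l (fun y hy => h y (by simp [hy]))
    omega

-- ===== the main simulation lemma =====
lemma loopA_eq : ∀ (fuel : Nat) (ps ss ans : List Int),
    ps.length ≤ ss.length →
    (∀ x ∈ ps.zip ss, 1 ≤ x.2) →
    measureA ps ≤ fuel →
    loopA fuel ps ss ans = ans ++ g ((ps.zip ss).map (fun x => daysB x.1 x.2)) 0 [] := by
  intro fuel
  induction fuel with
  | zero =>
    intro ps ss ans hlen hs hm
    have hnil : ps = [] := by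
      cases ps with
      | nil => rfl
      | cons p ps' => simp [measureA] at hm
    subst hnil; simp [loopA, g]
  | succ fuel ih =>
    intro ps ss ans hlen hs hm
    cases ps with
    | nil => simp [loopA, g]
    | cons p0 ps' =>
      cases ss with
      | nil => simp at hlen
      | cons s0 ss' =>
        have hlen' : ps'.length ≤ ss'.length := by simpa using hlen
        have hs0 : 1 ≤ s0 := hs (p0, s0) (by simp)
        have hmap := dayAdd_eq_map (p0 :: ps') (s0 :: ss') hlen
        have hzs := zip_shift (p0 :: ps') (s0 :: ss') hlen
        have hdays := days_shift_list ((p0 :: ps').zip (s0 :: ss')) hs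
        have hps1len : (dayAdd (p0 :: ps') (s0 :: ss')).length = ps'.length + 1 := by
          rw [hmap]; simp [List.length_zip]; omega
        have hsum1 : ((dayAdd (p0 :: ps') (s0 :: ss')).map (fun p => (100 - p).toNat)).sum
            ≤ ((p0 :: ps').map (fun p => (100 - p).toNat)).sum := by
          have h' := sum_map_le ((p0 :: ps').zip (s0 :: ss')) hs
          rw [List.map_fst_zip hlen] at h'
          rw [hmap]; exact h'
        simp only [loopA]
        by_cases hrel : (dayAdd (p0 :: ps') (s0 :: ss')).headD 0 ≥ 100
        · -- release day
          rw [if_pos hrel, popFinished_eq]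
          set ps1 := dayAdd (p0 :: ps') (s0 :: ss') with hps1
          set c := (ps1.takeWhile (fun p => 100 ≤ p)).length with hc
          have hcle : c ≤ ps1.length := by
            rw [hc]
            calc (ps1.takeWhile (fun p => 100 ≤ p)).length
                = (ps1.take (ps1.takeWhile (fun p => 100 ≤ p)).length).length := by
                  rw [takeWhile_prefix_take]
              _ ≤ ps1.length := by simp
          have hc1 : 1 ≤ c := by
            have hne : ps1 ≠ [] := by
              intro hcon; rw [hcon] at hps1len; simp at hps1len
            obtain ⟨q, qs, hq⟩ := List.exists_cons_of_ne_nil hne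
            have hq100 : (100 : Int) ≤ q := by
              rw [hq] at hrel; simpa using hrel
            rw [hc, hq, List.takeWhile_cons, if_pos (by simpa using hq100)]
            simp
          -- new state
          have hzip_new : (ps1.drop c).zip ((s0 :: ss').drop c)
              = (((p0 :: ps').zip (s0 :: ss')).drop c).map (fun x => (x.1 + x.2, x.2)) := by
            rw [zip_drop, hzs, ← List.map_drop]
          -- IH premises
          have hlen_new : (ps1.drop c).length ≤ ((s0 :: ss').drop c).length := by
            simp only [List.length_drop, hps1len]
            have h2 : ps'.length + 1 ≤ (s0 :: ss').length := by simpa using hlen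
            omega
          have hs_new : ∀ x ∈ (ps1.drop c).zip ((s0 :: ss').drop c), 1 ≤ x.2 := by
            intro x hx
            rw [hzip_new] at hx
            obtain ⟨y, hy, rfl⟩ := List.mem_map.mp hx
            exact hs y (List.mem_of_mem_drop hy)
          have hm_new : measureA (ps1.drop c) ≤ fuel := by
            have hsd : ((ps1.drop c).map (fun p => (100 - p).toNat)).sum
                ≤ (ps1.map (fun p => (100 - p).toNat)).sum := by
              rw [List.map_drop]
              have h3 := List.sum_take_add_sum_drop (ps1.map (fun p => (100 - p).toNat)) c
              omega
            have hmm : measureA (p0 :: ps') ≤ fuel + 1 := hm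
            have e1 : measureA (ps1.drop c)
                = (ps1.length - c) + (((ps1.drop c).map (fun p => (100 - p).toNat)).sum) := by
              simp [measureA]
            have e2 : measureA (p0 :: ps')
                = (ps'.length + 1) + (((p0 :: ps').map (fun p => (100 - p).toNat)).sum) := by
              simp [measureA]
            omega
          have hIH := ih (ps1.drop c) ((s0 :: ss').drop c) (ans ++ [(c : Int)]) hlen_new hs_new hm_new
          rw [hIH, hzip_new,
            days_shift_list (((p0 :: ps').zip (s0 :: ss')).drop c)
              (fun y hy => hs y (List.mem_of_mem_drop hy))]
          -- the finish-day list decomposes as c ones ++ the days of the remainder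
          have htk : ((((p0 :: ps').zip (s0 :: ss')).take c).map (fun x => daysB x.1 x.2))
              = List.replicate c 1 := by
            refine List.eq_replicate_iff.mpr ⟨?_, ?_⟩
            · have hcc : c ≤ ps'.length + 1 := by rw [hps1len] at hcle; exact hcle
              simp [List.length_take]
              omega
            · intro b hb
              obtain ⟨y, hy, rfl⟩ := List.mem_map.mp hb
              have hy' : y.1 + y.2 ∈ ps1.take c := by
                have h5 : y.1 + y.2 ∈ ((((p0 :: ps').zip (s0 :: ss')).take c).map (fun x => x.1 + x.2)) :=
                  List.mem_map.mpr ⟨y, hy, rfl⟩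
                rw [List.map_take, ← hmap] at h5
                exact h5
              have h100 : (100 : Int) ≤ y.1 + y.2 := by
                rw [hc, takeWhile_prefix_take] at hy'
                have h6 := List.mem_takeWhile_imp hy'
                simpa using h6
              exact (daysB_one_iff y.1 y.2 (hs y (List.mem_of_mem_take hy))).mpr h100
          have hdecomp : ((p0 :: ps').zip (s0 :: ss')).map (fun x => daysB x.1 x.2)
              = List.replicate c 1
                ++ ((((p0 :: ps').zip (s0 :: ss')).drop c).map (fun x => daysB x.1 x.2)) := by
            calc ((p0 :: ps').zip (s0 :: ss')).map (fun x => daysB x.1 x.2)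
                = ((((p0 :: ps').zip (s0 :: ss')).take c).map (fun x => daysB x.1 x.2))
                  ++ ((((p0 :: ps').zip (s0 :: ss')).drop c).map (fun x => daysB x.1 x.2)) := by
                  rw [← List.map_append, List.take_append_drop]
              _ = _ := by rw [htk]
          rw [hdecomp, g_release c _ [] hc1]
          cases hrest : (((p0 :: ps').zip (s0 :: ss')).drop c).map (fun x => daysB x.1 x.2) with
          | nil => simp [g]
          | cons d0 drest =>
            have hd0 : 2 ≤ d0 := by
              cases hLd : ((p0 :: ps').zip (s0 :: ss')).drop c with
              | nil => rw [hLd] at hrest; simp at hrest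
              | cons y ys =>
                rw [hLd] at hrest
                simp only [List.map_cons, List.cons.injEq] at hrest
                have hy1 : y.1 + y.2 < 100 := by
                  have hdropped : ps1.drop c = (y.1 + y.2) :: (ys.map (fun x => x.1 + x.2)) := by
                    rw [hmap, ← List.map_drop, hLd]; rfl
                  have h7 := drop_takeWhile_head (fun p => decide (100 ≤ p)) ps1 _ _ hdropped
                  simpa using h7
                have h8 := daysB_ge_two y.1 y.2 (hs y (by
                  have h9 : y ∈ ((p0 :: ps').zip (s0 :: ss')).drop c := by rw [hLd]; simp
                  exact List.mem_of_mem_drop h9)) hy1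
                rw [← hrest.1]
                exact h8
            rw [← g_low d0 drest 1 0 ([] ++ [(c : Int)]) hd0 (by omega) (by omega)]
            have hall : ∀ d ∈ (d0 :: drest).map (fun x => max 1 (x - 1)), 1 ≤ d := by
              intro d hd
              obtain ⟨y, _, rfl⟩ := List.mem_map.mp hd
              exact le_max_left _ _
            rw [g_zero_factor ((d0 :: drest).map (fun x => max 1 (x - 1))) ([] ++ [(c : Int)]) hall]
            simp
        · -- non-release day
          rw [if_neg hrel]
          have hhead : p0 + s0 < 100 := by
            rw [hmap] at hrel
            simpa using hrel
          have hlen1 : (dayAdd (p0 :: ps') (s0 :: ss')).length ≤ (s0 :: ss').length := by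
            rw [hps1len]; simpa using hlen
          have hs1 : ∀ x ∈ (dayAdd (p0 :: ps') (s0 :: ss')).zip (s0 :: ss'), 1 ≤ x.2 := by
            intro x hx
            rw [hzs] at hx
            obtain ⟨y, hy, rfl⟩ := List.mem_map.mp hx
            exact hs y hy
          have hm1 : measureA (dayAdd (p0 :: ps') (s0 :: ss')) ≤ fuel := by
            have hstrict : (100 - (p0 + s0)).toNat < (100 - p0).toNat := by omega
            have hmm : measureA (p0 :: ps') ≤ fuel + 1 := hm
            have hs' : ∀ x ∈ ps'.zip ss', 1 ≤ x.2 := by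
              intro x hx; exact hs x (by simp [List.zip_cons_cons, hx])
            have htail := sum_map_le (ps'.zip ss') hs'
            rw [List.map_fst_zip hlen'] at htail
            have hps1c : dayAdd (p0 :: ps') (s0 :: ss') = (p0 + s0) :: dayAdd ps' ss' := rfl
            have hda : dayAdd ps' ss' = (ps'.zip ss').map (fun x => x.1 + x.2) :=
              dayAdd_eq_map ps' ss' hlen'
            have hlz : ((ps'.zip ss').map (fun x => x.1 + x.2)).length = ps'.length := by
              simp [List.length_zip]; omega
            rw [hps1c, hda]
            simp only [measureA, List.map_cons, List.sum_cons, List.length_cons] at htail hmm ⊢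
            omega
          rw [ih (dayAdd (p0 :: ps') (s0 :: ss')) (s0 :: ss') ans hlen1 hs1 hm1, hzs, hdays]
          congr 1
          have hdaysL : ((p0 :: ps').zip (s0 :: ss')).map (fun x => daysB x.1 x.2)
              = daysB p0 s0 :: (ps'.zip ss').map (fun x => daysB x.1 x.2) := by
            simp [List.zip_cons_cons]
          rw [hdaysL]
          have hd2 := daysB_ge_two p0 s0 hs0 hhead
          exact g_low (daysB p0 s0) _ 0 0 [] hd2 (by omega) (by omega)

-- ===== VERDICT (by name: the statement is the Claim_ definition above) =====
theorem solution_spec : Claim_equal_solution := by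
  intro progresses speeds _hdom hpre
  unfold Spec_solution solution solution_alt
  rw [goB_eq_g]
  exact loopA_eq _ progresses speeds [] hpre.1 hpre.2 (le_refl _)
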